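-- pv_equiv track=rewrite | github.com/S1ngularD2ality/eidonic-language-elol | 00-100_core_glyph_architecture/glyph_46.py | echo_propagate
-- ===== SOURCE A (Python) =====
-- def echo_propagate(grid, steps):
--     """
--     Propagates non-zero values outward across steps.
--
--     Parameters:
--         grid (List[List[int]]): Input matrix.
--         steps (int): Number of echo rounds.
--
--     Returns:
--         List[List[int]]: Propagated grid.
--     """
--     from copy import deepcopy
--     n, m = len(grid), len(grid[0])
--     for _ in range(steps):
--         new_grid = deepcopy(grid)
--         for i in range(n):
--             for j in range(m):
--                 if grid[i][j] != 0:
--                     for dx, dy in [(-1,0),(1,0),(0,-1),(0,1)]: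
--                         ni, nj = i+dx, j+dy
--                         if 0 <= ni < n and 0 <= nj < m:
--                             new_grid[ni][nj] = grid[i][j]
--         grid = new_grid
--     return grid
-- ===== SOURCE B (Python) =====
-- def _pull(g, n, m, i, j):
--     """Value cell (i, j) should take this round: the first nonzero among its
--     neighbours probed in priority order below, else its own current value."""
--     for si, sj in ((i + 1, j), (i, j + 1), (i, j - 1), (i - 1, j)):
--         if 0 <= si < n and 0 <= sj < m and g[si][sj] != 0:
--             return g[si][sj]
--     return g[i][j]
--
--
-- def echo_propagate(grid, steps):
--     """Gather/pull propagation: each round builds the n-by-m grid afresh,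
--     every cell pulling from its highest-priority nonzero neighbour."""
--     n, m = len(grid), len(grid[0])
--     for _ in range(steps):
--         grid = [[_pull(grid, n, m, i, j) for j in range(m)] for i in range(n)]
--     return grid
-- ===== Notes on version B (the rewrite author's own statement) =====
-- stated objective: alternative
-- what changed: Replaces A's scatter/push (deepcopy each step, every nonzero cell overwrites its four neighbours in row-major last-writer-wins order) by a gather/pull: each new cell is built once by probing its neighbours in the reverse priority order (i+1,j), (i,j+1), (i,j-1), (i-1,j) and taking the first nonzero, so no deepcopy and no in-place overwriting is needed.
-- intended difference: On ragged grids where some row is longer than row 0 (and steps >= 1), A silently carries the cells beyond column len(grid[0]) through deepcopy while never touching them; B returns the clean n-by-len(grid[0]) matrix the docstring's 'matrix' contract describes, dropping the out-of-range tail cells, which is the intended normalisation. — e.g. on echo_propagate([[1], [0, 5]], 1): A returns [[1], [1, 5]], B returns [[1], [1]]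
import Mathlib
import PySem

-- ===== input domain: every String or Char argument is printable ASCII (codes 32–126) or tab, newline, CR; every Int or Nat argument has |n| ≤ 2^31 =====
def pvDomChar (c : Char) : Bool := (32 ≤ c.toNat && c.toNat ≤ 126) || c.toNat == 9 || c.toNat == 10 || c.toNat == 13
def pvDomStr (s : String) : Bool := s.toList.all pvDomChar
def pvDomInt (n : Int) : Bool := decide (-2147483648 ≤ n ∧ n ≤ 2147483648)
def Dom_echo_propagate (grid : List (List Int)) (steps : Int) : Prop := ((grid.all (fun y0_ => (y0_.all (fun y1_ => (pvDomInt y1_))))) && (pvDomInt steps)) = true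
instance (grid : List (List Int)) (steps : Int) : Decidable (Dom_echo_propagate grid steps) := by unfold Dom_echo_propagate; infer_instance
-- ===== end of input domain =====

-- B re-implements A's neighbour scatter (deepcopy + row-major last-writer-wins pushes)
-- as a single gather/pull per step (each new cell probes its neighbours in the reverse
-- of A's write order and takes the first nonzero); on ragged grids B returns the clean
-- n×m matrix where A keeps tail cells beyond column m — stated as D_ below.

-- ===== PORT A =====
-- grid[i][j] (read) and new_grid[ni][nj] = v (write); inside Pre_ every index used is in
-- range, so the getD defaults are never the result.
def pvGet2 (g : List (List Int)) (i j : Nat) : Int := (g.getD i []).getD j 0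
def pvSet2 (g : List (List Int)) (i j : Nat) (v : Int) : List (List Int) :=
  g.set i ((g.getD i []).set j v)

def pvDeltas : List (Int × Int) := [(-1,0),(1,0),(0,-1),(0,1)]

-- one round of A: new_grid = deepcopy(grid); scatter every nonzero grid[i][j] to its neighbours
def pvScatterStep (n m : Nat) (g : List (List Int)) : List (List Int) :=
  (List.range n).foldl (fun ng i =>
    (List.range m).foldl (fun ng j =>
      if pvGet2 g i j ≠ 0 then
        pvDeltas.foldl (fun ng dd =>
          if 0 ≤ (i:Int) + dd.1 ∧ (i:Int) + dd.1 < (n:Int) ∧ 0 ≤ (j:Int) + dd.2 ∧ (j:Int) + dd.2 < (m:Int) then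
            pvSet2 ng ((i:Int) + dd.1).toNat ((j:Int) + dd.2).toNat (pvGet2 g i j)
          else ng) ng
      else ng) ng) g

def echo_propagate (grid : List (List Int)) (steps : Int) : List (List Int) :=
  match PySem.List.pyGet? grid 0 with
  | none => []   -- len(grid[0]) raises IndexError on an empty grid (excluded by Pre_)
  | some row0 =>
    (PySem.List.pyRange 0 steps 1).foldl
      (fun g _ => pvScatterStep grid.length row0.length g) grid

-- ===== PORT B =====
-- _pull's early-return loop over the four neighbour candidates, as find?
def pvPull (g : List (List Int)) (n m : Nat) (i j : Nat) : Int :=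
  match [((i:Int)+1,(j:Int)), ((i:Int),(j:Int)+1), ((i:Int),(j:Int)-1), ((i:Int)-1,(j:Int))].find?
      (fun s => decide (0 ≤ s.1 ∧ s.1 < (n:Int) ∧ 0 ≤ s.2 ∧ s.2 < (m:Int) ∧ pvGet2 g s.1.toNat s.2.toNat ≠ 0)) with
  | some s => pvGet2 g s.1.toNat s.2.toNat
  | none => pvGet2 g i j

-- one round of B: build the n×m grid afresh, every cell pulling
def pvGatherStep (n m : Nat) (g : List (List Int)) : List (List Int) :=
  (List.range n).map (fun i => (List.range m).map (fun j => pvPull g n m i j))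

def echo_propagate_alt (grid : List (List Int)) (steps : Int) : List (List Int) :=
  match PySem.List.pyGet? grid 0 with
  | none => []   -- len(grid[0]) raises IndexError on an empty grid (excluded by Pre_)
  | some row0 =>
    (PySem.List.pyRange 0 steps 1).foldl
      (fun g _ => pvGatherStep grid.length row0.length g) grid

-- ===== PRECONDITION & SPEC =====
-- Exactly the inputs where Python A returns: a nonempty grid, and (when at least one
-- round runs) every row at least as long as row 0 — otherwise grid[i][j] raises IndexError.
def Pre_echo_propagate (grid : List (List Int)) (steps : Int) : Prop :=
  grid ≠ [] ∧ (steps ≤ 0 ∨ ∀ row ∈ grid, (grid.headD []).length ≤ row.length)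
instance (grid : List (List Int)) (steps : Int) : Decidable (Pre_echo_propagate grid steps) := by
  unfold Pre_echo_propagate; infer_instance

def pvWitness_echo_propagate : List (List Int) × Int := ([[1, 0, 0], [0, 0, -2]], 2)

-- On ragged grids where some row is longer than row 0 (and steps ≥ 1), A silently carries
-- the cells beyond column len(grid[0]) through deepcopy while never touching them; B returns
-- the clean n×len(grid[0]) matrix, dropping those tail cells — the intended normalisation.
def D_echo_propagate (grid : List (List Int)) (steps : Int) : Prop :=
  1 ≤ steps ∧ ∃ row ∈ grid, (grid.headD []).length < row.length
instance (grid : List (List Int)) (steps : Int) : Decidable (D_echo_propagate grid steps) := by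
  unfold D_echo_propagate; infer_instance

def Spec_echo_propagate (grid : List (List Int)) (steps : Int) (out : List (List Int)) : Prop := ¬ D_echo_propagate grid steps → out = echo_propagate_alt grid steps
instance (grid : List (List Int)) (steps : Int) (out : List (List Int)) : Decidable (Spec_echo_propagate grid steps out) := by unfold Spec_echo_propagate; infer_instance

def pvDiffWitness_echo_propagate : List (List Int) × Int := ([[1], [0, 5]], 1)
def pvDiffWitnessOut_echo_propagate : (List (List Int)) × (List (List Int)) :=
  ([[1], [1, 5]], [[1], [1]])

-- ===== CLAIM (what is proved, stated in full; the proofs are below) =====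
def Claim_unchanged_echo_propagate : Prop := ∀ (grid : List (List Int)) (steps : Int), Dom_echo_propagate grid steps → Pre_echo_propagate grid steps → Spec_echo_propagate grid steps (echo_propagate grid steps)
def Claim_changed_echo_propagate : Prop := Dom_echo_propagate (pvDiffWitness_echo_propagate.1) (pvDiffWitness_echo_propagate.2) ∧ Pre_echo_propagate (pvDiffWitness_echo_propagate.1) (pvDiffWitness_echo_propagate.2) ∧ D_echo_propagate (pvDiffWitness_echo_propagate.1) (pvDiffWitness_echo_propagate.2) ∧ echo_propagate (pvDiffWitness_echo_propagate.1) (pvDiffWitness_echo_propagate.2) = pvDiffWitnessOut_echo_propagate.1 ∧ echo_propagate_alt (pvDiffWitness_echo_propagate.1) (pvDiffWitness_echo_propagate.2) = pvDiffWitnessOut_echo_propagate.2 ∧ pvDiffWitnessOut_echo_propagate.1 ≠ pvDiffWitnessOut_echo_propagate.2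
def Claim_exact_echo_propagate : Prop := ∀ (grid : List (List Int)) (steps : Int), Dom_echo_propagate grid steps → Pre_echo_propagate grid steps → D_echo_propagate grid steps → echo_propagate grid steps ≠ echo_propagate_alt grid steps

-- ===== LEMMAS AND PROOFS =====

-- shape invariant maintained across rounds (rows of exact width m, grid of height n)
def pvInv (n m : Nat) (g : List (List Int)) : Prop :=
  g.length = n ∧ ∀ row ∈ g, row.length = m

-- a single neighbour write, and the row-major list of all writes of one scatter round
def pvApplyW (g : List (List Int)) (w : Nat × Nat × Int) : List (List Int) :=
  pvSet2 g w.1 w.2.1 w.2.2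

def pvH (g : List (List Int)) (n m : Nat) (i j : Nat) (dx dy : Int) : Option (Nat × Nat × Int) :=
  if 0 ≤ (i:Int) + dx ∧ (i:Int) + dx < (n:Int) ∧ 0 ≤ (j:Int) + dy ∧ (j:Int) + dy < (m:Int) then
    some (((i:Int) + dx).toNat, ((j:Int) + dy).toNat, pvGet2 g i j)
  else none

def pvBlock (g : List (List Int)) (n m : Nat) (i j : Nat) : List (Nat × Nat × Int) :=
  if pvGet2 g i j ≠ 0 then
    (pvH g n m i j (-1) 0).toList ++ (pvH g n m i j 1 0).toList ++
    (pvH g n m i j 0 (-1)).toList ++ (pvH g n m i j 0 1).toList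
  else []

def pvWrites (g : List (List Int)) (n m : Nat) : List (Nat × Nat × Int) :=
  (List.range n).flatMap (fun i => (List.range m).flatMap (fun j => pvBlock g n m i j))

-- last write targeting (a,b)
def pvLastW : List (Nat × Nat × Int) → Nat → Nat → Option Int
  | [], _, _ => none
  | w :: ws, a, b =>
    match pvLastW ws a b with
    | some v => some v
    | none => if w.1 = a ∧ w.2.1 = b then some w.2.2 else none

def pvOr : Option Int → Option Int → Option Int
  | some v, _ => some v
  | none, o => o

def pvDesc (F : Nat → Option Int) : Nat → Option Int
  | 0 => none
  | Nat.succ k => pvOr (F k) (pvDesc F k)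

lemma pvBlock_foldl (g : List (List Int)) (n m i j : Nat) (acc : List (List Int)) :
    (pvBlock g n m i j).foldl pvApplyW acc =
      if pvGet2 g i j ≠ 0 then
        pvDeltas.foldl (fun ng dd =>
          if 0 ≤ (i:Int) + dd.1 ∧ (i:Int) + dd.1 < (n:Int) ∧ 0 ≤ (j:Int) + dd.2 ∧ (j:Int) + dd.2 < (m:Int) then
            pvSet2 ng ((i:Int) + dd.1).toNat ((j:Int) + dd.2).toNat (pvGet2 g i j)
          else ng) acc
      else acc := by
  have hstep : ∀ (x : List (List Int)) (dx dy : Int),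
      ((pvH g n m i j dx dy).toList).foldl pvApplyW x =
        if 0 ≤ (i:Int) + dx ∧ (i:Int) + dx < (n:Int) ∧ 0 ≤ (j:Int) + dy ∧ (j:Int) + dy < (m:Int) then
          pvSet2 x ((i:Int) + dx).toNat ((j:Int) + dy).toNat (pvGet2 g i j)
        else x := by
    intro x dx dy
    unfold pvH
    split <;> simp [pvApplyW]
  unfold pvBlock
  by_cases hv : pvGet2 g i j = 0
  · simp [hv]
  · rw [if_pos hv, if_pos hv]
    unfold pvDeltas
    simp only [List.foldl_append, List.foldl_cons, List.foldl_nil, hstep]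

lemma pvScatterStep_eq_foldl_writes (n m : Nat) (g : List (List Int)) :
    pvScatterStep n m g = (pvWrites g n m).foldl pvApplyW g := by
  unfold pvScatterStep pvWrites
  simp only [List.foldl_flatMap, pvBlock_foldl]

lemma length_pvSet2 (g : List (List Int)) (i j : Nat) (v : Int) :
    (pvSet2 g i j v).length = g.length := by
  unfold pvSet2; simp

lemma rowlen_pvSet2 (g : List (List Int)) (i j : Nat) (v : Int) (k : Nat) :
    ((pvSet2 g i j v).getD k []).length = (g.getD k []).length := by
  unfold pvSet2
  by_cases hik : i = k
  · subst hik
    by_cases hi : i < g.length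
    · simp [List.getD_eq_getElem?_getD, List.getElem?_set, hi, List.getElem?_eq_getElem hi]
    · have hnone : g[i]? = none := by rw [List.getElem?_eq_none_iff]; omega
      simp [List.getD_eq_getElem?_getD, List.getElem?_set, hi, hnone]
  · simp [List.getD_eq_getElem?_getD, List.getElem?_set, hik]

lemma length_foldl_applyW (ws : List (Nat × Nat × Int)) (g : List (List Int)) :
    (ws.foldl pvApplyW g).length = g.length := by
  induction ws generalizing g with
  | nil => rfl
  | cons w ws ih => rw [List.foldl_cons, ih]; exact length_pvSet2 ..

lemma rowlen_foldl_applyW (ws : List (Nat × Nat × Int)) (g : List (List Int)) (k : Nat) :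
    ((ws.foldl pvApplyW g).getD k []).length = (g.getD k []).length := by
  induction ws generalizing g with
  | nil => rfl
  | cons w ws ih => rw [List.foldl_cons, ih]; exact rowlen_pvSet2 ..

lemma getE_foldl_applyW (ws : List (Nat × Nat × Int)) (g : List (List Int)) (a b : Nat)
    (hws : ∀ w ∈ ws, w.1 < g.length ∧ w.2.1 < (g.getD w.1 []).length) :
    ((ws.foldl pvApplyW g).getD a [])[b]? =
      match pvLastW ws a b with
      | some v => some v
      | none => ((g.getD a [])[b]?) := by
  induction ws generalizing g with
  | nil => simp [pvLastW]
  | cons w ws ih =>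
    rw [List.foldl_cons]
    have hw := hws w (List.mem_cons_self ..)
    have hrest : ∀ w' ∈ ws, w'.1 < (pvApplyW g w).length ∧
        w'.2.1 < ((pvApplyW g w).getD w'.1 []).length := by
      intro w' hw'
      have := hws w' (List.mem_cons_of_mem _ hw')
      unfold pvApplyW
      rw [length_pvSet2, rowlen_pvSet2]
      exact this
    have hset : ((pvApplyW g w).getD a [])[b]? =
        if w.1 = a ∧ w.2.1 = b then some w.2.2 else ((g.getD a [])[b]?) := by
      unfold pvApplyW pvSet2
      by_cases h1 : w.1 = a
      · have hw2 : w.2.1 < (g[w.1]'hw.1).length := by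
          have := hw.2
          rwa [List.getD_eq_getElem?_getD, List.getElem?_eq_getElem hw.1] at this
        by_cases h2 : w.2.1 = b
        · subst h1; subst h2
          simp [List.getD_eq_getElem?_getD, List.getElem?_eq_getElem hw.1,
            List.getElem?_set, hw2, hw.1]
        · subst h1
          simp [List.getD_eq_getElem?_getD, List.getElem?_eq_getElem hw.1,
            List.getElem?_set, h2, hw.1]
      · simp [List.getD_eq_getElem?_getD, List.getElem?_set, h1]
    rw [ih _ hrest, hset]
    simp only [pvLastW]
    cases h' : pvLastW ws a b with
    | some v => simp
    | none =>
      by_cases hP : w.1 = a ∧ w.2.1 = b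
      · simp [hP]
      · simp [hP]

lemma pvLastW_append (l1 l2 : List (Nat × Nat × Int)) (a b : Nat) :
    pvLastW (l1 ++ l2) a b = pvOr (pvLastW l2 a b) (pvLastW l1 a b) := by
  induction l1 with
  | nil =>
    simp only [List.nil_append]
    cases pvLastW l2 a b <;> rfl
  | cons w l1 ih =>
    rw [List.cons_append]
    simp only [pvLastW]
    rw [ih]
    cases pvLastW l2 a b <;> cases pvLastW l1 a b <;> rfl

lemma pvLastW_flatMap (n : Nat) (f : Nat → List (Nat × Nat × Int)) (a b : Nat) :
    pvLastW ((List.range n).flatMap f) a b = pvDesc (fun i => pvLastW (f i) a b) n := by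
  induction n with
  | zero => rfl
  | succ n ih =>
    rw [List.range_succ, List.flatMap_append, pvLastW_append]
    simp only [List.flatMap_cons, List.flatMap_nil, List.append_nil]
    rw [ih]; rfl

lemma pvOr_none_right (o : Option Int) : pvOr o none = o := by cases o <;> rfl

lemma pvDesc_none (F : Nat → Option Int) (n : Nat) (h : ∀ k, k < n → F k = none) :
    pvDesc F n = none := by
  induction n with
  | zero => rfl
  | succ n ih =>
    show pvOr (F n) (pvDesc F n) = none
    rw [h n (by omega), ih fun k hk => h k (by omega)]; rfl

lemma pvDesc_one (F : Nat → Option Int) (n c : Nat) (h : ∀ k, k < n → k ≠ c → F k = none) :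
    pvDesc F n = if c < n then F c else none := by
  induction n with
  | zero => simp [pvDesc]
  | succ n ih =>
    show pvOr (F n) (pvDesc F n) = _
    by_cases hc : n = c
    · subst hc
      rw [pvDesc_none F n fun k hk => h k (by omega) (by omega), if_pos (by omega)]
      exact pvOr_none_right _
    · rw [h n (by omega) hc, ih fun k hk hkc => h k (by omega) hkc]
      have e : (if c < n then F c else none) = if c < n + 1 then F c else none := by
        by_cases hcn : c < n
        · rw [if_pos hcn, if_pos (by omega)]
        · rw [if_neg hcn, if_neg (by omega)]
      rw [e]; rfl

lemma pvDesc_two (F : Nat → Option Int) (n c1 c2 : Nat) (hlt : c1 < c2)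
    (h : ∀ k, k < n → k ≠ c1 → k ≠ c2 → F k = none) :
    pvDesc F n = pvOr (if c2 < n then F c2 else none) (if c1 < n then F c1 else none) := by
  induction n with
  | zero => simp [pvDesc, pvOr]
  | succ n ih =>
    show pvOr (F n) (pvDesc F n) = _
    by_cases h2 : n = c2
    · subst h2
      rw [pvDesc_one F n c1 fun k hk hk1 => h k (by omega) hk1 (by omega),
        if_pos hlt, if_pos (by omega : n < n + 1), if_pos (by omega : c1 < n + 1)]
    · by_cases h1 : n = c1
      · subst h1
        rw [pvDesc_none F n fun k hk => h k (by omega) (by omega) (by omega),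
          if_neg (by omega : ¬ c2 < n + 1), if_pos (by omega : n < n + 1)]
        exact pvOr_none_right _
      · rw [h n (by omega) h1 h2, ih fun k hk hk1 hk2 => h k (by omega) hk1 hk2]
        have e2 : (if c2 < n then F c2 else none) = if c2 < n + 1 then F c2 else none := by
          by_cases hc : c2 < n
          · rw [if_pos hc, if_pos (by omega)]
          · rw [if_neg hc, if_neg (by omega)]
        have e1 : (if c1 < n then F c1 else none) = if c1 < n + 1 then F c1 else none := by
          by_cases hc : c1 < n
          · rw [if_pos hc, if_pos (by omega)]
          · rw [if_neg hc, if_neg (by omega)]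
        rw [e2, e1]; rfl

lemma pvDesc_three (F : Nat → Option Int) (n c1 c2 c3 : Nat) (h12 : c1 < c2) (h23 : c2 < c3)
    (h : ∀ k, k < n → k ≠ c1 → k ≠ c2 → k ≠ c3 → F k = none) :
    pvDesc F n = pvOr (if c3 < n then F c3 else none)
      (pvOr (if c2 < n then F c2 else none) (if c1 < n then F c1 else none)) := by
  induction n with
  | zero => simp [pvDesc, pvOr]
  | succ n ih =>
    show pvOr (F n) (pvDesc F n) = _
    by_cases h3 : n = c3
    · subst h3
      rw [pvDesc_two F n c1 c2 h12 fun k hk hk1 hk2 => h k (by omega) hk1 hk2 (by omega),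
        if_pos (by omega : n < n + 1), if_pos (by omega : c2 < n + 1),
        if_pos (by omega : c1 < n + 1), if_pos h23, if_pos (by omega : c1 < n)]
    · by_cases h2 : n = c2
      · subst h2
        rw [pvDesc_one F n c1 fun k hk hk1 => h k (by omega) hk1 (by omega) (by omega),
          if_pos h12, if_neg (by omega : ¬ c3 < n + 1), if_pos (by omega : n < n + 1),
          if_pos (by omega : c1 < n + 1)]
        rfl
      · by_cases h1 : n = c1
        · subst h1
          rw [pvDesc_none F n fun k hk => h k (by omega) (by omega) (by omega) (by omega),
            if_neg (by omega : ¬ c3 < n + 1), if_neg (by omega : ¬ c2 < n + 1),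
            if_pos (by omega : n < n + 1)]
          exact pvOr_none_right _
        · rw [h n (by omega) h1 h2 h3, ih fun k hk hk1 hk2 hk3 => h k (by omega) hk1 hk2 hk3]
          have e3 : (if c3 < n then F c3 else none) = if c3 < n + 1 then F c3 else none := by
            by_cases hc : c3 < n
            · rw [if_pos hc, if_pos (by omega)]
            · rw [if_neg hc, if_neg (by omega)]
          have e2 : (if c2 < n then F c2 else none) = if c2 < n + 1 then F c2 else none := by
            by_cases hc : c2 < n
            · rw [if_pos hc, if_pos (by omega)]
            · rw [if_neg hc, if_neg (by omega)]
          have e1 : (if c1 < n then F c1 else none) = if c1 < n + 1 then F c1 else none := by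
            by_cases hc : c1 < n
            · rw [if_pos hc, if_pos (by omega)]
            · rw [if_neg hc, if_neg (by omega)]
          rw [e3, e2, e1]; rfl

lemma pvOr_assoc (o1 o2 o3 : Option Int) :
    pvOr (pvOr o1 o2) o3 = pvOr o1 (pvOr o2 o3) := by
  cases o1 <;> cases o2 <;> rfl

lemma pvLastW_H (g : List (List Int)) (n m i j a b : Nat) (dx dy : Int) :
    pvLastW (pvH g n m i j dx dy).toList a b =
      if 0 ≤ (i:Int) + dx ∧ (i:Int) + dx < (n:Int) ∧ 0 ≤ (j:Int) + dy ∧ (j:Int) + dy < (m:Int) ∧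
          ((i:Int) + dx).toNat = a ∧ ((j:Int) + dy).toNat = b
      then some (pvGet2 g i j) else none := by
  unfold pvH
  by_cases hg : 0 ≤ (i:Int) + dx ∧ (i:Int) + dx < (n:Int) ∧ 0 ≤ (j:Int) + dy ∧ (j:Int) + dy < (m:Int)
  · rw [if_pos hg]
    show (if (((i:Int) + dx).toNat, ((j:Int) + dy).toNat, pvGet2 g i j).1 = a ∧
        (((i:Int) + dx).toNat, ((j:Int) + dy).toNat, pvGet2 g i j).2.1 = b
        then some (((i:Int) + dx).toNat, ((j:Int) + dy).toNat, pvGet2 g i j).2.2 else none) = _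
    by_cases ht : ((i:Int) + dx).toNat = a ∧ ((j:Int) + dy).toNat = b
    · rw [if_pos ht, if_pos ⟨hg.1, hg.2.1, hg.2.2.1, hg.2.2.2, ht.1, ht.2⟩]
    · rw [if_neg ht, if_neg (by tauto)]
  · rw [if_neg hg]
    show (none : Option Int) = _
    rw [if_neg (by tauto)]

lemma pvE1 (g : List (List Int)) (n m i j a b : Nat) (hi : i < n) (hj : j < m) :
    pvLastW (pvH g n m i j (-1) 0).toList a b =
      if i = a + 1 ∧ j = b then some (pvGet2 g i j) else none := by
  rw [pvLastW_H]
  exact if_congr ⟨fun h => by omega, fun h => by omega⟩ rfl rfl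

lemma pvE2 (g : List (List Int)) (n m i j a b : Nat) (hi : i < n) (hj : j < m) :
    pvLastW (pvH g n m i j 1 0).toList a b =
      if a = i + 1 ∧ a < n ∧ j = b then some (pvGet2 g i j) else none := by
  rw [pvLastW_H]
  exact if_congr ⟨fun h => by omega, fun h => by omega⟩ rfl rfl

lemma pvE3 (g : List (List Int)) (n m i j a b : Nat) (hi : i < n) (hj : j < m) :
    pvLastW (pvH g n m i j 0 (-1)).toList a b =
      if i = a ∧ j = b + 1 then some (pvGet2 g i j) else none := by
  rw [pvLastW_H]
  exact if_congr ⟨fun h => by omega, fun h => by omega⟩ rfl rfl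

lemma pvE4 (g : List (List Int)) (n m i j a b : Nat) (hi : i < n) (hj : j < m) :
    pvLastW (pvH g n m i j 0 1).toList a b =
      if i = a ∧ b = j + 1 ∧ b < m then some (pvGet2 g i j) else none := by
  rw [pvLastW_H]
  exact if_congr ⟨fun h => by omega, fun h => by omega⟩ rfl rfl

lemma pvLastW_block (g : List (List Int)) (n m i j a b : Nat) (hi : i < n) (hj : j < m) :
    pvLastW (pvBlock g n m i j) a b =
      if pvGet2 g i j ≠ 0 then
        pvOr (if i = a ∧ b = j + 1 ∧ b < m then some (pvGet2 g i j) else none)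
          (pvOr (if i = a ∧ j = b + 1 then some (pvGet2 g i j) else none)
            (pvOr (if a = i + 1 ∧ a < n ∧ j = b then some (pvGet2 g i j) else none)
              (if i = a + 1 ∧ j = b then some (pvGet2 g i j) else none)))
      else none := by
  unfold pvBlock
  by_cases hv : pvGet2 g i j = 0
  · simp [hv, pvLastW]
  · rw [if_pos hv, if_pos hv, pvLastW_append, pvLastW_append, pvLastW_append,
      pvE1 g n m i j a b hi hj, pvE2 g n m i j a b hi hj,
      pvE3 g n m i j a b hi hj, pvE4 g n m i j a b hi hj]

-- the three relevant source rows
lemma pvG_below (g : List (List Int)) (n m a b : Nat) (hb : b < m) (hA1 : a + 1 < n) :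
    pvDesc (fun j => pvLastW (pvBlock g n m (a+1) j) a b) m =
      if pvGet2 g (a+1) b ≠ 0 then some (pvGet2 g (a+1) b) else none := by
  rw [pvDesc_one _ m b ?support, if_pos hb,
    pvLastW_block g n m (a+1) b a b hA1 hb]
  case support =>
    intro k hk hkb
    rw [pvLastW_block g n m (a+1) k a b hA1 hk]
    by_cases hv : pvGet2 g (a+1) k = 0
    · simp [hv]
    · rw [if_pos hv, if_neg (by omega), if_neg (by omega), if_neg (by omega),
        if_neg (by omega)]
      rfl
  by_cases hv : pvGet2 g (a+1) b = 0
  · simp [hv]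
  · rw [if_pos hv, if_pos hv, if_neg (by omega), if_neg (by omega), if_neg (by omega),
      if_pos (by omega : a + 1 = a + 1 ∧ b = b)]
    rfl

lemma pvG_above (g : List (List Int)) (n m a b : Nat) (ha1 : 1 ≤ a) (ha : a < n) (hb : b < m) :
    pvDesc (fun j => pvLastW (pvBlock g n m (a-1) j) a b) m =
      if pvGet2 g (a-1) b ≠ 0 then some (pvGet2 g (a-1) b) else none := by
  have hia : a - 1 < n := by omega
  rw [pvDesc_one _ m b ?support, if_pos hb, pvLastW_block g n m (a-1) b a b hia hb]
  case support =>
    intro k hk hkb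
    rw [pvLastW_block g n m (a-1) k a b hia hk]
    by_cases hv : pvGet2 g (a-1) k = 0
    · simp [hv]
    · rw [if_pos hv, if_neg (by omega), if_neg (by omega), if_neg (by omega),
        if_neg (by omega)]
      rfl
  by_cases hv : pvGet2 g (a-1) b = 0
  · simp [hv]
  · rw [if_pos hv, if_pos hv, if_neg (by omega), if_neg (by omega),
      if_pos (by omega : a = a - 1 + 1 ∧ a < n ∧ b = b), if_neg (by omega)]
    rfl

lemma pvG_row (g : List (List Int)) (n m a b : Nat) (ha : a < n) (hb : b < m) :
    pvDesc (fun j => pvLastW (pvBlock g n m a j) a b) m =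
      pvOr (if b + 1 < m ∧ pvGet2 g a (b+1) ≠ 0 then some (pvGet2 g a (b+1)) else none)
        (if 1 ≤ b ∧ pvGet2 g a (b-1) ≠ 0 then some (pvGet2 g a (b-1)) else none) := by
  have hF1 : ∀ k, k < m → k = b + 1 →
      pvLastW (pvBlock g n m a k) a b =
        if pvGet2 g a (b+1) ≠ 0 then some (pvGet2 g a (b+1)) else none := by
    intro k hk hkb; subst hkb
    rw [pvLastW_block g n m a (b+1) a b ha hk]
    by_cases hv : pvGet2 g a (b+1) = 0
    · simp [hv]
    · rw [if_pos hv, if_pos hv, if_neg (by omega),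
        if_pos (by omega : a = a ∧ b + 1 = b + 1), if_neg (by omega), if_neg (by omega)]
      rfl
  have hF2 : ∀ k, k < m → 1 ≤ b → k = b - 1 →
      pvLastW (pvBlock g n m a k) a b =
        if pvGet2 g a (b-1) ≠ 0 then some (pvGet2 g a (b-1)) else none := by
    intro k hk hb1 hkb; subst hkb
    rw [pvLastW_block g n m a (b-1) a b ha hk]
    by_cases hv : pvGet2 g a (b-1) = 0
    · simp [hv]
    · rw [if_pos hv, if_pos (by omega : a = a ∧ b = b - 1 + 1 ∧ b < m), if_neg (by omega),
        if_neg (by omega), if_neg (by omega), if_pos hv]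
      rfl
  have hnone : ∀ k, k < m → k ≠ b + 1 → ¬(1 ≤ b ∧ k = b - 1) →
      pvLastW (pvBlock g n m a k) a b = none := by
    intro k hk h1 h2
    rw [pvLastW_block g n m a k a b ha hk]
    by_cases hv : pvGet2 g a k = 0
    · simp [hv]
    · rw [if_pos hv, if_neg (by omega), if_neg (by omega), if_neg (by omega),
        if_neg (by omega)]
      rfl
  rcases Nat.eq_zero_or_pos b with hb0 | hb1
  · subst hb0
    rw [pvDesc_one _ m 1 fun k hk hk1 => hnone k hk (by omega) (by omega)]
    rw [if_neg (by omega : ¬(1 ≤ 0 ∧ pvGet2 g a (0-1) ≠ 0)), pvOr_none_right]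
    by_cases h1m : 1 < m
    · rw [if_pos h1m, hF1 1 h1m rfl]
      by_cases hv : pvGet2 g a (0+1) ≠ 0
      · rw [if_pos hv, if_pos ⟨h1m, hv⟩]
      · rw [if_neg hv, if_neg (by tauto)]
    · rw [if_neg h1m, if_neg (by tauto)]
  · rw [pvDesc_two _ m (b-1) (b+1) (by omega)
      fun k hk hk1 hk2 => hnone k hk hk2 (by omega)]
    have e1 : (if b + 1 < m then pvLastW (pvBlock g n m a (b+1)) a b else none) =
        if b + 1 < m ∧ pvGet2 g a (b+1) ≠ 0 then some (pvGet2 g a (b+1)) else none := by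
      by_cases hbm : b + 1 < m
      · rw [if_pos hbm, hF1 (b+1) hbm rfl]
        by_cases hv : pvGet2 g a (b+1) ≠ 0
        · rw [if_pos hv, if_pos ⟨hbm, hv⟩]
        · rw [if_neg hv, if_neg (by tauto)]
      · rw [if_neg hbm, if_neg (by tauto)]
    have e2 : (if b - 1 < m then pvLastW (pvBlock g n m a (b-1)) a b else none) =
        if 1 ≤ b ∧ pvGet2 g a (b-1) ≠ 0 then some (pvGet2 g a (b-1)) else none := by
      rw [if_pos (by omega : b - 1 < m), hF2 (b-1) (by omega) hb1 rfl]
      by_cases hv : pvGet2 g a (b-1) ≠ 0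
      · rw [if_pos hv, if_pos ⟨hb1, hv⟩]
      · rw [if_neg hv, if_neg (by tauto)]
    rw [e1, e2]

-- B's pull equals the priority chain of the four neighbour options
lemma pvPull_char (g : List (List Int)) (n m a b : Nat) (ha : a < n) (hb : b < m) :
    (match
        pvOr (if a + 1 < n ∧ pvGet2 g (a+1) b ≠ 0 then some (pvGet2 g (a+1) b) else none)
          (pvOr (if b + 1 < m ∧ pvGet2 g a (b+1) ≠ 0 then some (pvGet2 g a (b+1)) else none)
            (pvOr (if 1 ≤ b ∧ pvGet2 g a (b-1) ≠ 0 then some (pvGet2 g a (b-1)) else none)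
              (if 1 ≤ a ∧ pvGet2 g (a-1) b ≠ 0 then some (pvGet2 g (a-1) b) else none)))
      with
      | some v => some v
      | none => (some (pvGet2 g a b) : Option Int)) = some (pvPull g n m a b) := by
  unfold pvPull
  have ea1 : ((a:Int) + 1).toNat = a + 1 := by omega
  have eb1 : ((b:Int) + 1).toNat = b + 1 := by omega
  have eaN : ((a:Int)).toNat = a := by omega
  have ebN : ((b:Int)).toNat = b := by omega
  by_cases h1 : a + 1 < n ∧ pvGet2 g (a+1) b ≠ 0
  · rw [List.find?_cons_of_pos (by
      refine decide_eq_true ⟨by omega, by omega, by omega, by omega, ?_⟩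
      rw [ea1, ebN]; exact h1.2)]
    rw [if_pos h1]
    show some (pvGet2 g (a+1) b) = some (pvGet2 g ((a:Int)+1).toNat ((b:Int)).toNat)
    rw [ea1, ebN]
  · rw [List.find?_cons_of_neg (by
      intro hc
      simp only [decide_eq_true_eq] at hc
      refine h1 ⟨by omega, ?_⟩
      have h5 := hc.2.2.2.2
      rwa [ea1, ebN] at h5)]
    rw [if_neg h1]
    show (match
        pvOr (if b + 1 < m ∧ pvGet2 g a (b+1) ≠ 0 then some (pvGet2 g a (b+1)) else none)
          (pvOr (if 1 ≤ b ∧ pvGet2 g a (b-1) ≠ 0 then some (pvGet2 g a (b-1)) else none)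
            (if 1 ≤ a ∧ pvGet2 g (a-1) b ≠ 0 then some (pvGet2 g (a-1) b) else none))
      with
      | some v => some v
      | none => (some (pvGet2 g a b) : Option Int)) = _
    by_cases h2 : b + 1 < m ∧ pvGet2 g a (b+1) ≠ 0
    · rw [List.find?_cons_of_pos (by
        refine decide_eq_true ⟨by omega, by omega, by omega, by omega, ?_⟩
        rw [eaN, eb1]; exact h2.2)]
      rw [if_pos h2]
      show some (pvGet2 g a (b+1)) = some (pvGet2 g ((a:Int)).toNat ((b:Int)+1).toNat)
      rw [eaN, eb1]
    · rw [List.find?_cons_of_neg (by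
        intro hc
        simp only [decide_eq_true_eq] at hc
        refine h2 ⟨by omega, ?_⟩
        have h5 := hc.2.2.2.2
        rwa [eaN, eb1] at h5)]
      rw [if_neg h2]
      show (match
          pvOr (if 1 ≤ b ∧ pvGet2 g a (b-1) ≠ 0 then some (pvGet2 g a (b-1)) else none)
            (if 1 ≤ a ∧ pvGet2 g (a-1) b ≠ 0 then some (pvGet2 g (a-1) b) else none)
        with
        | some v => some v
        | none => (some (pvGet2 g a b) : Option Int)) = _
      by_cases h3 : 1 ≤ b ∧ pvGet2 g a (b-1) ≠ 0
      · have ebm : ((b:Int) - 1).toNat = b - 1 := by omega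
        rw [List.find?_cons_of_pos (by
          refine decide_eq_true ⟨by omega, by omega, by omega, by omega, ?_⟩
          rw [eaN, ebm]; exact h3.2)]
        rw [if_pos h3]
        show some (pvGet2 g a (b-1)) = some (pvGet2 g ((a:Int)).toNat ((b:Int)-1).toNat)
        rw [eaN, ebm]
      · rw [List.find?_cons_of_neg (by
          intro hc
          simp only [decide_eq_true_eq] at hc
          have hb1 : 1 ≤ b := by omega
          have ebm : ((b:Int) - 1).toNat = b - 1 := by omega
          have h5 := hc.2.2.2.2
          rw [eaN, ebm] at h5
          exact h3 ⟨hb1, h5⟩)]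
        rw [if_neg h3]
        show (match
            (if 1 ≤ a ∧ pvGet2 g (a-1) b ≠ 0 then some (pvGet2 g (a-1) b) else none)
          with
          | some v => some v
          | none => (some (pvGet2 g a b) : Option Int)) = _
        by_cases h4 : 1 ≤ a ∧ pvGet2 g (a-1) b ≠ 0
        · have eam : ((a:Int) - 1).toNat = a - 1 := by omega
          rw [List.find?_cons_of_pos (by
            refine decide_eq_true ⟨by omega, by omega, by omega, by omega, ?_⟩
            rw [eam, ebN]; exact h4.2)]
          rw [if_pos h4]
          show some (pvGet2 g (a-1) b) = some (pvGet2 g ((a:Int)-1).toNat ((b:Int)).toNat)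
          rw [eam, ebN]
        · rw [List.find?_cons_of_neg (by
            intro hc
            simp only [decide_eq_true_eq] at hc
            have ha1 : 1 ≤ a := by omega
            have eam : ((a:Int) - 1).toNat = a - 1 := by omega
            have h5 := hc.2.2.2.2
            rw [eam, ebN] at h5
            exact h4 ⟨ha1, h5⟩)]
          rw [if_neg h4]
          rfl

-- the main per-cell characterisation: last writer to (a,b) = B's pull priority
lemma pvCell (n m : Nat) (g : List (List Int)) (hn : g.length = n)
    (hm : ∀ row ∈ g, m ≤ row.length) (a b : Nat) (ha : a < n) (hb : b < m) :
    (match pvLastW (pvWrites g n m) a b with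
      | some v => some v
      | none => ((g.getD a [])[b]?)) = some (pvPull g n m a b) := by
  have ha' : a < g.length := by rw [hn]; exact ha
  have hrow : b < (g.getD a []).length := by
    have hmem : g.getD a [] ∈ g := by
      rw [List.getD_eq_getElem?_getD, List.getElem?_eq_getElem ha']
      exact List.getElem_mem _
    exact lt_of_lt_of_le hb (hm _ hmem)
  have hval : pvGet2 g a b = (g.getD a [])[b] := by
    unfold pvGet2
    generalize hr : g.getD a [] = row at hrow ⊢
    rw [List.getD_eq_getElem?_getD, List.getElem?_eq_getElem hrow]
    rfl
  have hdef : (g.getD a [])[b]? = some (pvGet2 g a b) := by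
    rw [List.getElem?_eq_getElem hrow, hval]
  rw [hdef]
  have hwB : pvLastW (pvWrites g n m) a b =
      pvDesc (fun i => pvDesc (fun j => pvLastW (pvBlock g n m i j) a b) m) n := by
    unfold pvWrites
    rw [pvLastW_flatMap]
    have : (fun i => pvLastW ((List.range m).flatMap fun j => pvBlock g n m i j) a b) =
        fun i => pvDesc (fun j => pvLastW (pvBlock g n m i j) a b) m :=
      funext fun i => pvLastW_flatMap ..
    rw [this]
  rw [hwB]
  have hnone : ∀ i, i < n → i ≠ a → i ≠ a + 1 → a ≠ i + 1 →
      pvDesc (fun j => pvLastW (pvBlock g n m i j) a b) m = none := by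
    intro i hi hia hia1 hai1
    apply pvDesc_none
    intro k hk
    rw [pvLastW_block g n m i k a b hi hk]
    by_cases hv : pvGet2 g i k = 0
    · simp [hv]
    · rw [if_pos hv, if_neg (by omega), if_neg (by omega), if_neg (by omega),
        if_neg (by omega)]
      rfl
  have eA : (if a + 1 < n then pvDesc (fun j => pvLastW (pvBlock g n m (a+1) j) a b) m else none) =
      if a + 1 < n ∧ pvGet2 g (a+1) b ≠ 0 then some (pvGet2 g (a+1) b) else none := by
    by_cases hA1 : a + 1 < n
    · rw [if_pos hA1, pvG_below g n m a b hb hA1]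
      by_cases hv : pvGet2 g (a+1) b ≠ 0
      · rw [if_pos hv, if_pos ⟨hA1, hv⟩]
      · rw [if_neg hv, if_neg (by tauto)]
    · rw [if_neg hA1, if_neg (by tauto)]
  rcases Nat.eq_zero_or_pos a with ha0 | ha1
  · subst ha0
    rw [pvDesc_two _ n 0 1 (by omega)
      fun k hk hk0 hk1 => hnone k hk hk0 hk1 (by omega)]
    rw [if_pos (by omega : (0:Nat) < n), pvG_row g n m 0 b ha hb]
    rw [show (if 1 < n then pvDesc (fun j => pvLastW (pvBlock g n m 1 j) 0 b) m else none) =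
        if 0 + 1 < n then pvDesc (fun j => pvLastW (pvBlock g n m (0+1) j) 0 b) m else none from rfl,
      eA]
    rw [← pvOr_none_right ((if 1 ≤ b ∧ pvGet2 g 0 (b-1) ≠ 0 then some (pvGet2 g 0 (b-1)) else none)),
      show (none : Option Int) =
        (if 1 ≤ 0 ∧ pvGet2 g (0-1) b ≠ 0 then some (pvGet2 g (0-1) b) else none) from
        (if_neg (by omega)).symm]
    exact pvPull_char g n m 0 b ha hb
  · rw [pvDesc_three _ n (a-1) a (a+1) (by omega) (by omega)
      fun k hk hk1 hk2 hk3 => hnone k hk hk2 hk3 (by omega)]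
    rw [eA, if_pos ha, pvG_row g n m a b ha hb]
    rw [show (if a - 1 < n then pvDesc (fun j => pvLastW (pvBlock g n m (a-1) j) a b) m else none) =
        pvDesc (fun j => pvLastW (pvBlock g n m (a-1) j) a b) m from if_pos (by omega),
      pvG_above g n m a b ha1 ha hb]
    rw [show (if pvGet2 g (a-1) b ≠ 0 then some (pvGet2 g (a-1) b) else none) =
        (if 1 ≤ a ∧ pvGet2 g (a-1) b ≠ 0 then some (pvGet2 g (a-1) b) else none) from by
      by_cases hv : pvGet2 g (a-1) b ≠ 0
      · rw [if_pos hv, if_pos ⟨ha1, hv⟩]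
      · rw [if_neg hv, if_neg (by tauto)]]
    rw [pvOr_assoc]
    exact pvPull_char g n m a b ha hb

lemma pvWrites_target_lt (g : List (List Int)) (n m : Nat) :
    ∀ w ∈ pvWrites g n m, w.1 < n ∧ w.2.1 < m := by
  intro w hw
  unfold pvWrites at hw
  simp only [List.mem_flatMap] at hw
  obtain ⟨i, _, j, _, hb⟩ := hw
  have hdd : ∀ dx dy : Int, w ∈ (pvH g n m i j dx dy).toList → w.1 < n ∧ w.2.1 < m := by
    intro dx dy hmem
    unfold pvH at hmem
    split at hmem
    · simp only [Option.toList_some, List.mem_singleton] at hmem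
      subst hmem
      constructor <;> simp <;> omega
    · simp at hmem
  unfold pvBlock at hb
  split at hb
  · simp only [List.mem_append] at hb
    rcases hb with ((h | h) | h) | h
    exacts [hdd _ _ h, hdd _ _ h, hdd _ _ h, hdd _ _ h]
  · simp at hb

lemma pvLastW_none_of (ws : List (Nat × Nat × Int)) (a b : Nat)
    (h : ∀ w ∈ ws, ¬(w.1 = a ∧ w.2.1 = b)) : pvLastW ws a b = none := by
  induction ws with
  | nil => rfl
  | cons w ws ih =>
    show (match pvLastW ws a b with
      | some v => some v
      | none => if w.1 = a ∧ w.2.1 = b then some w.2.2 else none) = none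
    rw [ih fun w' hw' => h w' (List.mem_cons_of_mem _ hw'),
      if_neg (h w (List.mem_cons_self ..))]

lemma pvStepAgree (n m : Nat) (g : List (List Int)) (h : pvInv n m g) :
    pvScatterStep n m g = pvGatherStep n m g := by
  obtain ⟨hn, hm⟩ := h
  have hm' : ∀ row ∈ g, m ≤ row.length := fun row hr => le_of_eq (hm row hr).symm
  rw [pvScatterStep_eq_foldl_writes]
  have hws : ∀ w ∈ pvWrites g n m, w.1 < g.length ∧ w.2.1 < (g.getD w.1 []).length := by
    intro w hw
    have htl := pvWrites_target_lt g n m w hw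
    have h1 : w.1 < g.length := by omega
    refine ⟨h1, ?_⟩
    have hmem : g.getD w.1 [] ∈ g := by
      rw [List.getD_eq_getElem?_getD, List.getElem?_eq_getElem h1]
      exact List.getElem_mem _
    exact lt_of_lt_of_le htl.2 (hm' _ hmem)
  have hlen : (List.foldl pvApplyW g (pvWrites g n m)).length = g.length :=
    length_foldl_applyW ..
  have hglen : (pvGatherStep n m g).length = n := by
    unfold pvGatherStep
    simp
  apply List.ext_getElem?
  intro ia
  by_cases hia : ia < n
  · have hres : ia < (List.foldl pvApplyW g (pvWrites g n m)).length := by omega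
    have hrowB : (pvGatherStep n m g)[ia]? =
        some ((List.range m).map (fun j => pvPull g n m ia j)) := by
      unfold pvGatherStep
      rw [List.getElem?_map, List.getElem?_range hia]
      rfl
    rw [hrowB, List.getElem?_eq_getElem hres]
    have hrowres : (List.foldl pvApplyW g (pvWrites g n m))[ia] =
        (List.foldl pvApplyW g (pvWrites g n m)).getD ia [] := by
      rw [List.getD_eq_getElem?_getD, List.getElem?_eq_getElem hres]
      rfl
    rw [hrowres]
    congr 1
    apply List.ext_getElem?
    intro ib
    by_cases hib : ib < m
    · rw [getE_foldl_applyW _ _ _ _ hws, pvCell n m g hn hm' ia ib hia hib]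
      rw [List.getElem?_map, List.getElem?_range hib]
      rfl
    · have hrowlen : ((g.getD ia []).length) = m := by
        have h1 : ia < g.length := by omega
        have hmem : g.getD ia [] ∈ g := by
          rw [List.getD_eq_getElem?_getD, List.getElem?_eq_getElem h1]
          exact List.getElem_mem _
        exact hm _ hmem
      have hnone : pvLastW (pvWrites g n m) ia ib = none := by
        apply pvLastW_none_of
        intro w hw hcon
        have := (pvWrites_target_lt g n m w hw).2
        omega
      rw [getE_foldl_applyW _ _ _ _ hws, hnone]
      rw [List.getElem?_eq_none (by omega), List.getElem?_eq_none (by simp; omega)]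
  · rw [List.getElem?_eq_none (by omega), List.getElem?_eq_none (by omega)]

lemma pvGather_inv (n m : Nat) (g : List (List Int)) :
    pvInv n m (pvGatherStep n m g) := by
  unfold pvInv pvGatherStep
  constructor
  · simp
  · intro row hrow
    simp only [List.mem_map] at hrow
    obtain ⟨i, _, rfl⟩ := hrow
    simp

lemma pvFoldAgree (n m : Nat) (l : List Int) (g : List (List Int)) (h : pvInv n m g) :
    l.foldl (fun g _ => pvScatterStep n m g) g = l.foldl (fun g _ => pvGatherStep n m g) g := by
  induction l generalizing g with
  | nil => rfl
  | cons x l ih =>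
    rw [List.foldl_cons, List.foldl_cons, pvStepAgree n m g h]
    exact ih _ (pvGather_inv n m g)

-- shape of A's result: scatter rounds preserve the grid's and every row's length
lemma length_pvScatterStep (n m : Nat) (g : List (List Int)) :
    (pvScatterStep n m g).length = g.length := by
  rw [pvScatterStep_eq_foldl_writes]; exact length_foldl_applyW ..

lemma rowlen_pvScatterStep (n m : Nat) (g : List (List Int)) (k : Nat) :
    ((pvScatterStep n m g).getD k []).length = (g.getD k []).length := by
  rw [pvScatterStep_eq_foldl_writes]; exact rowlen_foldl_applyW ..

lemma pvScatterFold_shape (n m : Nat) (l : List Int) (g : List (List Int)) (k : Nat) :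
    (l.foldl (fun g _ => pvScatterStep n m g) g).length = g.length ∧
    ((l.foldl (fun g _ => pvScatterStep n m g) g).getD k []).length = (g.getD k []).length := by
  induction l generalizing g with
  | nil => exact ⟨rfl, rfl⟩
  | cons x l ih =>
    rw [List.foldl_cons]
    obtain ⟨h1, h2⟩ := ih (pvScatterStep n m g)
    exact ⟨h1.trans (length_pvScatterStep ..), h2.trans (rowlen_pvScatterStep ..)⟩

-- shape of B's result after at least one round: every row has length exactly m
lemma pvGatherFold_rowlen (n m : Nat) (l : List Int) (g : List (List Int)) (hl : l ≠ [])
    (k : Nat) (hk : k < n) :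
    ((l.foldl (fun g _ => pvGatherStep n m g) g).getD k []).length = m := by
  induction l generalizing g with
  | nil => exact absurd rfl hl
  | cons x l ih =>
    rw [List.foldl_cons]
    cases l with
    | cons y l' => exact ih (pvGatherStep n m g) (by simp)
    | nil =>
      show ((pvGatherStep n m g).getD k []).length = m
      unfold pvGatherStep
      rw [List.getD_eq_getElem?_getD, List.getElem?_map, List.getElem?_range hk]
      simp

-- ===== VERDICT (by name: the statement is the Claim_ definition above) =====
theorem echo_propagate_spec : Claim_unchanged_echo_propagate := by
  intro grid steps _ hPre hnD
  obtain ⟨hne, hsteps⟩ := hPre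
  unfold echo_propagate echo_propagate_alt
  cases grid with
  | nil => exact absurd rfl hne
  | cons r rs =>
    simp only [PySem.List.pyGet?_zero_cons]
    rcases le_or_gt steps 0 with hle | hpos
    · rw [PySem.List.pyRange_one_eq_nil (by omega)]
      rfl
    · rcases hsteps with hle | hrows
      · omega
      · unfold D_echo_propagate at hnD
        push_neg at hnD
        have hub := hnD (by omega)
        refine pvFoldAgree _ _ _ _ ⟨rfl, ?_⟩
        intro row hr
        have h1 : r.length ≤ row.length := by simpa using hrows row hr
        have h2 : ¬ r.length < row.length := by
          intro hlt
          exact absurd hlt (by simpa using hub row hr)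
        omega

theorem echo_propagate_changed : Claim_changed_echo_propagate := by
  unfold Claim_changed_echo_propagate; decide

theorem echo_propagate_tight : Claim_exact_echo_propagate := by
  intro grid steps _ hPre hD heq
  obtain ⟨hne, _⟩ := hPre
  obtain ⟨hs1, row, hrow, hlt⟩ := hD
  cases grid with
  | nil => exact absurd rfl hne
  | cons r rs =>
    unfold echo_propagate echo_propagate_alt at heq
    simp only [PySem.List.pyGet?_zero_cons] at heq
    set n := (r :: rs).length with hn
    set m := r.length with hm
    set l := PySem.List.pyRange 0 steps 1 with hl
    have hlne : l ≠ [] := by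
      rw [hl, PySem.List.pyRange_one_cons (by omega)]
      simp
    -- index of the long row
    obtain ⟨k, hk, hkr⟩ := List.getElem_of_mem hrow
    have hklt : k < n := by omega
    have hA : ((l.foldl (fun g _ => pvScatterStep n m g) (r :: rs)).getD k []).length
        = row.length := by
      rw [(pvScatterFold_shape n m l (r :: rs) k).2, List.getD_eq_getElem?_getD,
        List.getElem?_eq_getElem hk, hkr]
      rfl
    have hB : ((l.foldl (fun g _ => pvGatherStep n m g) (r :: rs)).getD k []).length = m :=
      pvGatherFold_rowlen n m l (r :: rs) hlne k hklt
    rw [heq, hB] at hA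
    simp only [List.headD_cons] at hlt
    omega
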